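-- pv_equiv track=rewrite | github.com/superzhangmch/qr_decoder | qr_decode.py | is_data_module
-- ===== SOURCE A (Python) =====
-- def is_data_module(r, c, size):
--     """Check if position is data (not function pattern)."""
--     # Finder patterns and separators (top-left, top-right, bottom-left)
--     if r <= 8 and c <= 8: return False
--     if r <= 8 and c >= size-8: return False
--     if r >= size-8 and c <= 8: return False
--     # Timing patterns
--     if r == 6 or c == 6: return False
--     # Format info
--     if r == 8 and (c <= 8 or c >= size-8): return False
--     if c == 8 and (r <= 8 or r >= size-7): return False
--     if r == size-8 and c == 8: return False
--
--     version = (size - 17) // 4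
--
--     # Version info (v >= 7): 6x3 blocks near top-right and bottom-left
--     if version >= 7:
--         if r < 6 and c >= size-11 and c < size-8: return False  # Top-right version
--         if c < 6 and r >= size-11 and r < size-8: return False  # Bottom-left version
--
--     # Alignment patterns - all QR codes v2+ have them
--     if version >= 2:
--         # Alignment pattern center positions for each version
--         AP_POSITIONS = {
--             2:[6,18],3:[6,22],4:[6,26],5:[6,30],6:[6,34],7:[6,22,38],8:[6,24,42],9:[6,26,46],10:[6,28,50],
--             11:[6,30,54],12:[6,32,58],13:[6,34,62],14:[6,26,46,66],15:[6,26,48,70],16:[6,26,50,74],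
--             17:[6,30,54,78],18:[6,30,56,82],19:[6,30,58,86],20:[6,34,62,90],21:[6,28,50,72,94],
--             22:[6,26,50,74,98],23:[6,30,54,78,102],24:[6,28,54,80,106],25:[6,32,58,84,110],
--             26:[6,30,58,86,114],27:[6,34,62,90,118],28:[6,26,50,74,98,122],29:[6,30,54,78,102,126],
--             30:[6,26,52,78,104,130],31:[6,30,56,82,108,134],32:[6,34,60,86,112,138],
--             33:[6,30,58,86,114,142],34:[6,34,62,90,118,146],35:[6,30,54,78,102,126,150],
--             36:[6,24,50,76,102,128,154],37:[6,28,54,80,106,132,158],38:[6,32,58,84,110,136,162],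
--             39:[6,26,54,82,110,138,166],40:[6,30,58,86,114,142,170]
--         }
--         positions = AP_POSITIONS.get(version, [])
--         for ar in positions:
--             for ac in positions:
--                 # Skip alignment patterns that overlap with finder patterns
--                 if ar <= 8 and ac <= 8: continue  # Top-left finder
--                 if ar <= 8 and ac >= size-9: continue  # Top-right finder
--                 if ar >= size-9 and ac <= 8: continue  # Bottom-left finder
--                 # Check if current position is within this alignment pattern (5x5)
--                 if abs(r - ar) <= 2 and abs(c - ac) <= 2:
--                     return False
--
--     return True
-- ===== SOURCE B (Python) =====
-- # B: classify the cell by five independent region predicates combined in one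
-- # boolean expression (instead of A's sequential guard chain), and locate the
-- # single nearby alignment center per axis with one scan each (centers are >4
-- # apart) instead of A's nested double loop. Alternative decomposition.
--
-- _AP_POSITIONS = {
--     2:[6,18],3:[6,22],4:[6,26],5:[6,30],6:[6,34],7:[6,22,38],8:[6,24,42],9:[6,26,46],10:[6,28,50],
--     11:[6,30,54],12:[6,32,58],13:[6,34,62],14:[6,26,46,66],15:[6,26,48,70],16:[6,26,50,74],
--     17:[6,30,54,78],18:[6,30,56,82],19:[6,30,58,86],20:[6,34,62,90],21:[6,28,50,72,94],
--     22:[6,26,50,74,98],23:[6,30,54,78,102],24:[6,28,54,80,106],25:[6,32,58,84,110],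
--     26:[6,30,58,86,114],27:[6,34,62,90,118],28:[6,26,50,74,98,122],29:[6,30,54,78,102,126],
--     30:[6,26,52,78,104,130],31:[6,30,56,82,108,134],32:[6,34,60,86,112,138],
--     33:[6,30,58,86,114,142],34:[6,34,62,90,118,146],35:[6,30,54,78,102,126,150],
--     36:[6,24,50,76,102,128,154],37:[6,28,54,80,106,132,158],38:[6,32,58,84,110,136,162],
--     39:[6,26,54,82,110,138,166],40:[6,30,58,86,114,142,170]
-- }
--
-- def _near(x, positions):
--     """First (and, as gaps exceed 4, only) center within distance 2 of x."""
--     for a in positions: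
--         if abs(x - a) <= 2:
--             return a
--     return None
--
-- def is_data_module(r, c, size):
--     """Check if position is data (not function pattern)."""
--     v = (size - 17) // 4
--     finder = (r <= 8 and c <= 8) or (r <= 8 and c >= size - 8) or (r >= size - 8 and c <= 8)
--     timing = r == 6 or c == 6
--     fmt = ((r == 8 and (c <= 8 or c >= size - 8))
--            or (c == 8 and (r <= 8 or r >= size - 7))
--            or (r == size - 8 and c == 8))
--     vinfo = v >= 7 and ((r < 6 and size - 11 <= c < size - 8)
--                         or (c < 6 and size - 11 <= r < size - 8))
--     align = False
--     if v >= 2: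
--         pos = _AP_POSITIONS.get(v, [])
--         ar = _near(r, pos)
--         ac = _near(c, pos)
--         if ar is not None and ac is not None:
--             align = not ((ar <= 8 and ac <= 8) or (ar <= 8 and ac >= size - 9)
--                          or (ar >= size - 9 and ac <= 8))
--     return not (finder or timing or fmt or vinfo or align)
-- ===== Notes on version B (the rewrite author's own statement) =====
-- stated objective: alternative
-- what changed: A's sequential early-return guard chain is replaced by five independent region predicates (finder, timing, format, version-info, alignment) combined in one boolean expression, and A's nested double loop over all alignment-center pairs is replaced by a single-pass per-axis lookup of the unique center within distance 2 (centers are more than 4 apart).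
import Mathlib
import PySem

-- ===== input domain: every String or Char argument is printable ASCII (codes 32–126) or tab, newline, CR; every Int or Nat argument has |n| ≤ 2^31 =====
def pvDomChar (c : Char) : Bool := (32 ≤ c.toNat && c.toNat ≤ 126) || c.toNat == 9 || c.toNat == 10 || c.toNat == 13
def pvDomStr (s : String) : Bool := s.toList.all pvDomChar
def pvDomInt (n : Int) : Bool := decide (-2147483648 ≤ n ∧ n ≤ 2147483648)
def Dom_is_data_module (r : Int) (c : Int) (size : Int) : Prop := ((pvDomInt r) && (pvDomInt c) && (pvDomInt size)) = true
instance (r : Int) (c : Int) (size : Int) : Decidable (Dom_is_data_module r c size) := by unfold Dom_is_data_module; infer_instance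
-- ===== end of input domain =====

-- B replaces A's sequential guard chain by five independent region predicates
-- combined in one boolean expression, and A's nested double loop over
-- alignment-center pairs by one single-pass lookup per axis (alternative
-- decomposition).

-- ===== PORT A =====
-- The AP_POSITIONS dict literal (shared verbatim by both Pythons)
def apTable : PySem.Dict Int (List Int) := PySem.Dict.ofList [
  (2,[6,18]),(3,[6,22]),(4,[6,26]),(5,[6,30]),(6,[6,34]),(7,[6,22,38]),(8,[6,24,42]),
  (9,[6,26,46]),(10,[6,28,50]),(11,[6,30,54]),(12,[6,32,58]),(13,[6,34,62]),
  (14,[6,26,46,66]),(15,[6,26,48,70]),(16,[6,26,50,74]),(17,[6,30,54,78]),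
  (18,[6,30,56,82]),(19,[6,30,58,86]),(20,[6,34,62,90]),(21,[6,28,50,72,94]),
  (22,[6,26,50,74,98]),(23,[6,30,54,78,102]),(24,[6,28,54,80,106]),(25,[6,32,58,84,110]),
  (26,[6,30,58,86,114]),(27,[6,34,62,90,118]),(28,[6,26,50,74,98,122]),
  (29,[6,30,54,78,102,126]),(30,[6,26,52,78,104,130]),(31,[6,30,56,82,108,134]),
  (32,[6,34,60,86,112,138]),(33,[6,30,58,86,114,142]),(34,[6,34,62,90,118,146]),
  (35,[6,30,54,78,102,126,150]),(36,[6,24,50,76,102,128,154]),(37,[6,28,54,80,106,132,158]),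
  (38,[6,32,58,84,110,136,162]),(39,[6,26,54,82,110,138,166]),(40,[6,30,58,86,114,142,170])]

-- the body of A's inner double loop (continue on finder overlap, then 5x5 test)
def apPairHit (r c size ar ac : Int) : Bool :=
  if ar ≤ 8 ∧ ac ≤ 8 then false
  else if ar ≤ 8 ∧ ac ≥ size - 9 then false
  else if ar ≥ size - 9 ∧ ac ≤ 8 then false
  else decide ((r - ar).natAbs ≤ 2 ∧ (c - ac).natAbs ≤ 2)

def is_data_module (r : Int) (c : Int) (size : Int) : Bool :=
  if r ≤ 8 ∧ c ≤ 8 then false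
  else if r ≤ 8 ∧ c ≥ size - 8 then false
  else if r ≥ size - 8 ∧ c ≤ 8 then false
  else if r = 6 ∨ c = 6 then false
  else if r = 8 ∧ (c ≤ 8 ∨ c ≥ size - 8) then false
  else if c = 8 ∧ (r ≤ 8 ∨ r ≥ size - 7) then false
  else if r = size - 8 ∧ c = 8 then false
  -- version and positions are inlined (version = (size-17)//4)
  else if 7 ≤ PySem.Int.floordiv (size - 17) 4 ∧ (r < 6 ∧ c ≥ size - 11 ∧ c < size - 8) then false
  else if 7 ≤ PySem.Int.floordiv (size - 17) 4 ∧ (c < 6 ∧ r ≥ size - 11 ∧ r < size - 8) then false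
  else if 2 ≤ PySem.Int.floordiv (size - 17) 4 then
    if (apTable.getD (PySem.Int.floordiv (size - 17) 4) []).any (fun ar =>
        (apTable.getD (PySem.Int.floordiv (size - 17) 4) []).any (fun ac =>
          apPairHit r c size ar ac))
    then false else true
  else true

-- ===== PORT B =====
-- _near(x, positions): first (unique) center within distance 2 of x, else None
def bNear? (x : Int) (positions : List Int) : Option Int :=
  positions.find? (fun a => decide ((x - a).natAbs ≤ 2))

-- the alignment-pattern predicate of B (false unless v >= 2 and the unique
-- nearby centers exist and do not overlap a finder corner)
def bAlign (r c size v : Int) : Bool :=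
  if 2 ≤ v then
    match bNear? r (apTable.getD v []), bNear? c (apTable.getD v []) with
    | some ar, some ac =>
        !decide ((ar ≤ 8 ∧ ac ≤ 8) ∨ (ar ≤ 8 ∧ size - 9 ≤ ac) ∨ (size - 9 ≤ ar ∧ ac ≤ 8))
    | _, _ => false
  else false

def is_data_module_alt (r : Int) (c : Int) (size : Int) : Bool :=
  let v := PySem.Int.floordiv (size - 17) 4
  let finder := decide ((r ≤ 8 ∧ c ≤ 8) ∨ (r ≤ 8 ∧ size - 8 ≤ c) ∨ (size - 8 ≤ r ∧ c ≤ 8))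
  let timing := decide (r = 6 ∨ c = 6)
  let fmt := decide ((r = 8 ∧ (c ≤ 8 ∨ size - 8 ≤ c)) ∨ (c = 8 ∧ (r ≤ 8 ∨ size - 7 ≤ r)) ∨
                     (r = size - 8 ∧ c = 8))
  let vinfo := decide (7 ≤ v) &&
               decide ((r < 6 ∧ size - 11 ≤ c ∧ c < size - 8) ∨ (c < 6 ∧ size - 11 ≤ r ∧ r < size - 8))
  !(finder || timing || fmt || vinfo || bAlign r c size v)

-- ===== PRECONDITION & SPEC =====
def Spec_is_data_module (r : Int) (c : Int) (size : Int) (out : Bool) : Prop := out = is_data_module_alt r c size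
instance (r : Int) (c : Int) (size : Int) (out : Bool) : Decidable (Spec_is_data_module r c size out) := by unfold Spec_is_data_module; infer_instance

-- ===== CLAIM =====
def Claim_equal_is_data_module : Prop := ∀ (r : Int) (c : Int) (size : Int), Dom_is_data_module r c size → Spec_is_data_module r c size (is_data_module r c size)

-- ===== LEMMAS AND PROOFS =====

-- every list of centers in the table has pairwise gaps > 4
set_option maxRecDepth 100000 in
set_option maxHeartbeats 1000000 in
lemma apTable_gap (v : Int) :
    List.Pairwise (fun a b => a + 4 < b) (apTable.getD v []) := by
  rw [PySem.Dict.getD_eq_get?_getD]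
  cases h : apTable.get? v with
  | none => simp
  | some l =>
      have hmem := PySem.Dict.mem_items_of_get?_eq_some apTable h
      have hall : ∀ p ∈ apTable.items,
          List.Pairwise (fun a b : Int => a + 4 < b) p.2 := by decide
      simpa using hall _ hmem

-- two centers of a gap-list both within distance 2 of x coincide
lemma gap_unique {pos : List Int}
    (hgap : List.Pairwise (fun a b => a + 4 < b) pos)
    {x a b : Int} (ha : a ∈ pos) (hb : b ∈ pos)
    (hna : (x - a).natAbs ≤ 2) (hnb : (x - b).natAbs ≤ 2) : a = b := by
  by_contra hne
  have h2 : List.Pairwise (fun a b : Int => a + 4 < b ∨ b + 4 < a) pos :=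
    hgap.imp (fun h => Or.inl h)
  have hsym : Symmetric (fun a b : Int => a + 4 < b ∨ b + 4 < a) :=
    fun _ _ h => h.symm
  have := List.Pairwise.forall hsym h2 ha hb hne
  omega

-- core: A's double loop hits iff B's per-axis lookup finds a non-corner pair
lemma loop_eq_lookup (r c size : Int) (pos : List Int)
    (hgap : List.Pairwise (fun a b => a + 4 < b) pos) :
    pos.any (fun ar => pos.any (fun ac => apPairHit r c size ar ac))
    = (match bNear? r pos, bNear? c pos with
       | some ar, some ac =>
           !decide ((ar ≤ 8 ∧ ac ≤ 8) ∨ (ar ≤ 8 ∧ size - 9 ≤ ac) ∨ (size - 9 ≤ ar ∧ ac ≤ 8))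
       | _, _ => false) := by
  cases hA : pos.any (fun ar => pos.any (fun ac => apPairHit r c size ar ac)) with
  | true =>
      simp only [List.any_eq_true] at hA
      obtain ⟨ar, har, ac, hac, hhit⟩ := hA
      unfold apPairHit at hhit
      split_ifs at hhit with h1 h2 h3
      simp only [decide_eq_true_eq] at hhit
      obtain ⟨hnr, hnc⟩ := hhit
      have hfr : bNear? r pos = some ar := by
        unfold bNear?
        cases hf : pos.find? (fun a => decide ((r - a).natAbs ≤ 2)) with
        | none =>
            exact absurd (by simpa using List.find?_eq_none.mp hf ar har) (by simp [hnr])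
        | some a' =>
            have hm := List.mem_of_find?_eq_some hf
            have hp : (r - a').natAbs ≤ 2 := by simpa using List.find?_some hf
            rw [gap_unique hgap hm har hp hnr]
      have hfc : bNear? c pos = some ac := by
        unfold bNear?
        cases hf : pos.find? (fun a => decide ((c - a).natAbs ≤ 2)) with
        | none =>
            exact absurd (by simpa using List.find?_eq_none.mp hf ac hac) (by simp [hnc])
        | some a' =>
            have hm := List.mem_of_find?_eq_some hf
            have hp : (c - a').natAbs ≤ 2 := by simpa using List.find?_some hf
            rw [gap_unique hgap hm hac hp hnc]
      rw [hfr, hfc]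
      simp
      omega
  | false =>
      cases hfr : bNear? r pos with
      | none => simp
      | some ar =>
          cases hfc : bNear? c pos with
          | none => simp
          | some ac =>
              have hmr := List.mem_of_find?_eq_some hfr
              have hpr : (r - ar).natAbs ≤ 2 := by simpa using List.find?_some hfr
              have hmc := List.mem_of_find?_eq_some hfc
              have hpc : (c - ac).natAbs ≤ 2 := by simpa using List.find?_some hfc
              have hhit2 : apPairHit r c size ar ac = false := by
                by_contra hcon
                have htrue : pos.any (fun ar => pos.any (fun ac => apPairHit r c size ar ac)) = true :=
                  List.any_eq_true.mpr ⟨ar, hmr, List.any_eq_true.mpr ⟨ac, hmc, by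
                    simpa using hcon⟩⟩
                rw [hA] at htrue
                exact absurd htrue (by simp)
              unfold apPairHit at hhit2
              split_ifs at hhit2 with h1 h2 h3
              · simp; omega
              · simp; omega
              · simp; omega
              · exact absurd hhit2 (by simp [hpr, hpc])

-- ===== VERDICT =====
set_option maxRecDepth 100000 in
theorem is_data_module_spec : Claim_equal_is_data_module := by
  intro r c size _
  unfold Spec_is_data_module
  have halt : is_data_module_alt r c size =
      !(decide ((r ≤ 8 ∧ c ≤ 8) ∨ (r ≤ 8 ∧ size - 8 ≤ c) ∨ (size - 8 ≤ r ∧ c ≤ 8)) ||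
        decide (r = 6 ∨ c = 6) ||
        decide ((r = 8 ∧ (c ≤ 8 ∨ size - 8 ≤ c)) ∨ (c = 8 ∧ (r ≤ 8 ∨ size - 7 ≤ r)) ∨
                (r = size - 8 ∧ c = 8)) ||
        (decide (7 ≤ PySem.Int.floordiv (size - 17) 4) &&
         decide ((r < 6 ∧ size - 11 ≤ c ∧ c < size - 8) ∨
                 (c < 6 ∧ size - 11 ≤ r ∧ r < size - 8))) ||
        bAlign r c size (PySem.Int.floordiv (size - 17) 4)) := rfl
  rw [halt]
  unfold is_data_module
  by_cases h1 : r ≤ 8 ∧ c ≤ 8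
  · rw [if_pos h1]
    have hd : ((r ≤ 8 ∧ c ≤ 8) ∨ (r ≤ 8 ∧ size - 8 ≤ c) ∨ (size - 8 ≤ r ∧ c ≤ 8)) := Or.inl h1
    simp only [decide_eq_true hd, Bool.true_or, Bool.not_true]
  rw [if_neg h1]
  by_cases h2 : r ≤ 8 ∧ c ≥ size - 8
  · rw [if_pos h2]
    have hd : ((r ≤ 8 ∧ c ≤ 8) ∨ (r ≤ 8 ∧ size - 8 ≤ c) ∨ (size - 8 ≤ r ∧ c ≤ 8)) :=
      Or.inr (Or.inl h2)
    simp only [decide_eq_true hd, Bool.true_or, Bool.not_true]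
  rw [if_neg h2]
  by_cases h3 : r ≥ size - 8 ∧ c ≤ 8
  · rw [if_pos h3]
    have hd : ((r ≤ 8 ∧ c ≤ 8) ∨ (r ≤ 8 ∧ size - 8 ≤ c) ∨ (size - 8 ≤ r ∧ c ≤ 8)) :=
      Or.inr (Or.inr h3)
    simp only [decide_eq_true hd, Bool.true_or, Bool.not_true]
  rw [if_neg h3]
  by_cases h4 : r = 6 ∨ c = 6
  · rw [if_pos h4]
    simp only [decide_eq_true h4, Bool.or_true, Bool.true_or, Bool.not_true]
  rw [if_neg h4]
  by_cases h5 : r = 8 ∧ (c ≤ 8 ∨ c ≥ size - 8)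
  · rw [if_pos h5]
    have hd : ((r = 8 ∧ (c ≤ 8 ∨ size - 8 ≤ c)) ∨ (c = 8 ∧ (r ≤ 8 ∨ size - 7 ≤ r)) ∨
               (r = size - 8 ∧ c = 8)) := Or.inl h5
    simp only [decide_eq_true hd, Bool.or_true, Bool.true_or, Bool.not_true]
  rw [if_neg h5]
  by_cases h6 : c = 8 ∧ (r ≤ 8 ∨ r ≥ size - 7)
  · rw [if_pos h6]
    have hd : ((r = 8 ∧ (c ≤ 8 ∨ size - 8 ≤ c)) ∨ (c = 8 ∧ (r ≤ 8 ∨ size - 7 ≤ r)) ∨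
               (r = size - 8 ∧ c = 8)) := Or.inr (Or.inl h6)
    simp only [decide_eq_true hd, Bool.or_true, Bool.true_or, Bool.not_true]
  rw [if_neg h6]
  by_cases h7 : r = size - 8 ∧ c = 8
  · rw [if_pos h7]
    have hd : ((r = 8 ∧ (c ≤ 8 ∨ size - 8 ≤ c)) ∨ (c = 8 ∧ (r ≤ 8 ∨ size - 7 ≤ r)) ∨
               (r = size - 8 ∧ c = 8)) := Or.inr (Or.inr h7)
    simp only [decide_eq_true hd, Bool.or_true, Bool.true_or, Bool.not_true]
  rw [if_neg h7]
  by_cases h8 : 7 ≤ PySem.Int.floordiv (size - 17) 4 ∧ (r < 6 ∧ c ≥ size - 11 ∧ c < size - 8)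
  · rw [if_pos h8]
    have hd : ((r < 6 ∧ size - 11 ≤ c ∧ c < size - 8) ∨
               (c < 6 ∧ size - 11 ≤ r ∧ r < size - 8)) := Or.inl h8.2
    simp only [decide_eq_true h8.1, decide_eq_true hd, Bool.and_self, Bool.or_true,
      Bool.true_or, Bool.not_true]
  rw [if_neg h8]
  by_cases h9 : 7 ≤ PySem.Int.floordiv (size - 17) 4 ∧ (c < 6 ∧ r ≥ size - 11 ∧ r < size - 8)
  · rw [if_pos h9]
    have hd : ((r < 6 ∧ size - 11 ≤ c ∧ c < size - 8) ∨
               (c < 6 ∧ size - 11 ≤ r ∧ r < size - 8)) := Or.inr h9.2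
    simp only [decide_eq_true h9.1, decide_eq_true hd, Bool.and_self, Bool.or_true,
      Bool.true_or, Bool.not_true]
  rw [if_neg h9]
  -- now all four non-alignment components of B are false
  have hf : decide ((r ≤ 8 ∧ c ≤ 8) ∨ (r ≤ 8 ∧ size - 8 ≤ c) ∨ (size - 8 ≤ r ∧ c ≤ 8)) = false :=
    decide_eq_false (fun h => h.elim h1 (fun h' => h'.elim h2 h3))
  have ht : decide (r = 6 ∨ c = 6) = false := decide_eq_false h4
  have hm : decide ((r = 8 ∧ (c ≤ 8 ∨ size - 8 ≤ c)) ∨ (c = 8 ∧ (r ≤ 8 ∨ size - 7 ≤ r)) ∨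
                    (r = size - 8 ∧ c = 8)) = false :=
    decide_eq_false (fun h => h.elim h5 (fun h' => h'.elim h6 h7))
  have hvi : (decide (7 ≤ PySem.Int.floordiv (size - 17) 4) &&
              decide ((r < 6 ∧ size - 11 ≤ c ∧ c < size - 8) ∨
                      (c < 6 ∧ size - 11 ≤ r ∧ r < size - 8))) = false := by
    by_cases hv7 : 7 ≤ PySem.Int.floordiv (size - 17) 4
    · have hp : ¬((r < 6 ∧ size - 11 ≤ c ∧ c < size - 8) ∨
                  (c < 6 ∧ size - 11 ≤ r ∧ r < size - 8)) :=
        fun h => h.elim (fun p => h8 ⟨hv7, p⟩) (fun p => h9 ⟨hv7, p⟩)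
      rw [decide_eq_false hp, Bool.and_false]
    · rw [decide_eq_false hv7, Bool.false_and]
  rw [hf, ht, hm, hvi]
  by_cases h10 : 2 ≤ PySem.Int.floordiv (size - 17) 4
  · rw [if_pos h10]
    have hb : bAlign r c size (PySem.Int.floordiv (size - 17) 4)
        = (apTable.getD (PySem.Int.floordiv (size - 17) 4) []).any (fun ar =>
            (apTable.getD (PySem.Int.floordiv (size - 17) 4) []).any (fun ac =>
              apPairHit r c size ar ac)) := by
      unfold bAlign
      rw [if_pos h10, ← loop_eq_lookup r c size _ (apTable_gap _)]
    rw [hb]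
    cases hA : (apTable.getD (PySem.Int.floordiv (size - 17) 4) []).any (fun ar =>
        (apTable.getD (PySem.Int.floordiv (size - 17) 4) []).any (fun ac =>
          apPairHit r c size ar ac)) <;> simp
  · rw [if_neg h10]
    have hb : bAlign r c size (PySem.Int.floordiv (size - 17) 4) = false := by
      unfold bAlign; rw [if_neg h10]
    rw [hb]
    simp
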